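-- pv_equiv track=rewrite | github.com/ziglang/zig | rpython/jit/tl/tiny2_hotpath.py | myint_internal
-- ===== SOURCE A (Python) =====
-- def myint_internal(s, start=0):
--     if start >= len(s):
--         return -1
--     res = 0
--     while start < len(s):
--         c = s[start]
--         n = ord(c) - ord('0')
--         if not (0 <= n <= 9):
--             return -1
--         res = res * 10 + n
--         start += 1
--     return res
-- ===== SOURCE B (Python) =====
-- def myint_internal(s, start=0):
--     if start >= len(s):
--         return -1
--     sub = s[start:]
--     if sub.isascii() and sub.isdigit():
--         return int(sub)
--     return -1
-- ===== Notes on version B (the rewrite author's own statement) =====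
-- stated objective: simpler
-- what changed: Replaces the single index-walking accumulate-and-validate while loop by a two-pass slice-validate-convert decomposition: take sub = s[start:], check sub.isascii() and sub.isdigit(), and return int(sub) or -1.
-- intended difference: For negative start with -len(s) <= start < 0 where the tail s[start:] is all digits and s is not all zeros, A's negative indexing wraps and effectively parses s[start:]+s (returning that concatenated number, or -1 if s has a non-digit), while B parses just the suffix s[start:], which is the intended slice meaning of a start position. — e.g. on myint_internal("12", -1): A returns 212, B returns 2
import Mathlib
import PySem

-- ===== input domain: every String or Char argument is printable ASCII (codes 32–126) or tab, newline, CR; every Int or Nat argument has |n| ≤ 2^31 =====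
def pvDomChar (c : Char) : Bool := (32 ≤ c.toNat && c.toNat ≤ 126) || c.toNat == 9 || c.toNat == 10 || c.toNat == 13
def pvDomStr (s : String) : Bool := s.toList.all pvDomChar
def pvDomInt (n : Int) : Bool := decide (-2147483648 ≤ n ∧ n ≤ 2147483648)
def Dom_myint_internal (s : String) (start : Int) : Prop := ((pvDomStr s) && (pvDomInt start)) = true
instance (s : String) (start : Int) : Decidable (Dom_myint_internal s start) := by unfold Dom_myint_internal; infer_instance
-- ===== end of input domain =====

-- B replaces A's index-walking accumulate-while-validating loop by a two-pass slice / validate / convert decomposition (objective: simpler); return value only, no mutation involved.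

-- ===== PORT A =====
-- the while loop; fuel = number of remaining iterations (len - start), only making the recursion total
def pvLoopA : List Char → Int → Int → Nat → Int
  | _, _, res, 0 => res
  | cs, start, res, fuel + 1 =>
    if start < PySem.Chars.len cs then
      let c := PySem.List.pyGetD cs start ' '   -- s[start]; IndexError (start < -len(s)) excluded by Pre_
      let n : Int := (c.toNat : Int) - 48       -- ord(c) - ord('0')
      if 0 ≤ n ∧ n ≤ 9 then pvLoopA cs (start + 1) (res * 10 + n) fuel else -1
    else res

def myint_internal (s : String) (start : Int) : Int :=
  if PySem.Chars.len s.toList ≤ start then -1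
  else pvLoopA s.toList start 0 (PySem.Chars.len s.toList - start).toNat

-- ===== PORT B =====
-- hand port of int(sub): exact here because B only calls it on a nonempty, all-ASCII-digit string
def pvDigitsVal (cs : List Char) : Int :=
  cs.foldl (fun acc c => acc * 10 + ((c.toNat : Int) - 48)) 0

def myint_internal_alt (s : String) (start : Int) : Int :=
  if PySem.Chars.len s.toList ≤ start then -1
  else
    let sub := PySem.List.slice s.toList (some start) none
    -- sub.isascii() ported by hand as "every code point ≤ 127" (exact); sub.isdigit() is PySem.Chars.strIsdigit
    if sub.all (fun c => c.toNat ≤ 127) && PySem.Chars.strIsdigit sub then pvDigitsVal sub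
    else -1

-- ===== PRECONDITION & SPEC =====
-- Pre_ excludes exactly the inputs where A raises IndexError: start < -len(s) (s[start] out of range).
def Pre_myint_internal (s : String) (start : Int) : Prop := -(PySem.Chars.len s.toList) ≤ start
instance (s : String) (start : Int) : Decidable (Pre_myint_internal s start) := by
  unfold Pre_myint_internal; infer_instance
def pvWitness_myint_internal : String × Int := ("42", 0)

-- For negative start with -len(s) ≤ start < 0 where the tail s[start:] is all digits and s is not all
-- zeros, A's negative indexing wraps and effectively parses s[start:]+s (that concatenated number, or -1
-- if s has a non-digit), while B parses just the suffix s[start:], the intended slice meaning of a start position.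
def D_myint_internal (s : String) (start : Int) : Prop :=
  start < 0 ∧ -(PySem.Chars.len s.toList) ≤ start ∧
  (List.drop ((s.toList.length : Int) + start).toNat s.toList).all PySem.Chars.isdigit = true ∧
  ¬ (s.toList.all (fun c => c = '0') = true)
instance (s : String) (start : Int) : Decidable (D_myint_internal s start) := by
  unfold D_myint_internal; infer_instance

def Spec_myint_internal (s : String) (start : Int) (out : Int) : Prop :=
  ¬ D_myint_internal s start → out = myint_internal_alt s start
instance (s : String) (start : Int) (out : Int) : Decidable (Spec_myint_internal s start out) := by
  unfold Spec_myint_internal; infer_instance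

def pvDiffWitness_myint_internal : String × Int := ("12", -1)
def pvDiffWitnessOut_myint_internal : Int × Int := (212, 2)


-- ===== CLAIM (what is proved, stated in full; the proofs are below) =====
def Claim_unchanged_myint_internal : Prop := ∀ (s : String) (start : Int), Dom_myint_internal s start → Pre_myint_internal s start → Spec_myint_internal s start (myint_internal s start)
def Claim_changed_myint_internal : Prop := Dom_myint_internal (pvDiffWitness_myint_internal.1) (pvDiffWitness_myint_internal.2) ∧ Pre_myint_internal (pvDiffWitness_myint_internal.1) (pvDiffWitness_myint_internal.2) ∧ D_myint_internal (pvDiffWitness_myint_internal.1) (pvDiffWitness_myint_internal.2) ∧ myint_internal (pvDiffWitness_myint_internal.1) (pvDiffWitness_myint_internal.2) = pvDiffWitnessOut_myint_internal.1 ∧ myint_internal_alt (pvDiffWitness_myint_internal.1) (pvDiffWitness_myint_internal.2) = pvDiffWitnessOut_myint_internal.2 ∧ pvDiffWitnessOut_myint_internal.1 ≠ pvDiffWitnessOut_myint_internal.2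
def Claim_exact_myint_internal : Prop := ∀ (s : String) (start : Int), Dom_myint_internal s start → Pre_myint_internal s start → D_myint_internal s start → myint_internal s start ≠ myint_internal_alt s start

-- ===== LEMMAS AND PROOFS =====

-- pure scan over the remaining character sequence (proof device)
def pvScan : List Char → Int → Int
  | [], res => res
  | c :: t, res =>
    if 0 ≤ (c.toNat : Int) - 48 ∧ (c.toNat : Int) - 48 ≤ 9 then pvScan t (res * 10 + ((c.toNat : Int) - 48))
    else -1

theorem pvDig_iff (c : Char) :
    (0 ≤ (c.toNat : Int) - 48 ∧ (c.toNat : Int) - 48 ≤ 9) ↔ PySem.Chars.isdigit c = true := by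
  simp only [PySem.Chars.isdigit, Bool.and_eq_true, decide_eq_true_eq, Char.le_def,
    UInt32.le_iff_toNat_le, Char.toNat]
  have h0 : '0'.val.toNat = 48 := by decide
  have h9 : '9'.val.toNat = 57 := by decide
  omega
theorem pvScan_all (l : List Char) :
    ∀ res, (∀ c ∈ l, PySem.Chars.isdigit c = true) →
      pvScan l res = l.foldl (fun acc c => acc * 10 + ((c.toNat : Int) - 48)) res := by
  induction l with
  | nil => intro res _; rfl
  | cons c t ih =>
    intro res h
    rw [pvScan, if_pos ((pvDig_iff c).mpr (h c (by simp)))]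
    simpa using ih _ (fun x hx => h x (by simp [hx]))
theorem pvScan_bad (l : List Char) :
    ∀ res, (∃ c ∈ l, ¬ PySem.Chars.isdigit c = true) → pvScan l res = -1 := by
  induction l with
  | nil => simp
  | cons c t ih =>
    intro res ⟨x, hx, hxd⟩
    rw [pvScan]
    split
    · rename_i hdig
      rcases List.mem_cons.mp hx with rfl | hxt
      · exact absurd ((pvDig_iff x).mp hdig) hxd
      · exact ih _ ⟨x, hxt, hxd⟩
    · rfl
theorem pvFold_shift (l : List Char) :
    ∀ res : Int, l.foldl (fun acc c => acc * 10 + ((c.toNat : Int) - 48)) res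
      = res * 10 ^ l.length + pvDigitsVal l := by
  induction l with
  | nil => intro res; simp [pvDigitsVal]
  | cons c t ih =>
    intro res
    simp only [List.foldl_cons, List.length_cons, pvDigitsVal] at *
    rw [ih, ih ((0:Int) * 10 + _)]
    ring
theorem pvFold_nonneg (l : List Char) :
    ∀ res : Int, (∀ c ∈ l, PySem.Chars.isdigit c = true) → 0 ≤ res →
      0 ≤ l.foldl (fun acc c => acc * 10 + ((c.toNat : Int) - 48)) res := by
  induction l with
  | nil => intro res _ h; simpa using h
  | cons c t ih =>
    intro res h hr
    have hd := (pvDig_iff c).mpr (h c (by simp))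
    simp only [List.foldl_cons]
    exact ih _ (fun x hx => h x (by simp [hx])) (by omega)
theorem pvFold_zeros (l : List Char) :
    (∀ c ∈ l, c = '0') →
      l.foldl (fun acc c => acc * 10 + ((c.toNat : Int) - 48)) 0 = 0 := by
  induction l with
  | nil => intro _; rfl
  | cons c t ih =>
    intro h
    have hc : c = '0' := h c (by simp)
    subst hc
    have h0 : '0'.toNat = 48 := rfl
    simp only [List.foldl_cons, h0]
    norm_num
    exact ih (fun x hx => h x (by simp [hx]))
theorem pvZeros_of_fold (l : List Char) :
    (∀ c ∈ l, PySem.Chars.isdigit c = true) → pvDigitsVal l = 0 → ∀ c ∈ l, c = '0' := by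
  induction l with
  | nil => simp
  | cons c t ih =>
    intro h h0 x hx
    have hd := (pvDig_iff c).mpr (h c (by simp))
    have ht : ∀ y ∈ t, PySem.Chars.isdigit y = true := fun y hy => h y (by simp [hy])
    have hsh : pvDigitsVal (c :: t) = ((c.toNat : Int) - 48) * 10 ^ t.length + pvDigitsVal t := by
      show List.foldl (fun acc c => acc * 10 + ((c.toNat : Int) - 48)) 0 (c :: t)
        = ((c.toNat : Int) - 48) * 10 ^ t.length + pvDigitsVal t
      rw [List.foldl_cons, pvFold_shift]
      ring
    have htn : 0 ≤ pvDigitsVal t := pvFold_nonneg t 0 ht le_rfl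
    have hpow : (0:Int) < 10 ^ t.length := by positivity
    have hc0 : (c.toNat : Int) - 48 = 0 := by nlinarith [hsh, h0]
    have hc : c = '0' := by
      have hn : c.toNat = 48 := by omega
      have hv : c.val.toNat = 48 := hn
      exact Char.ext (UInt32.toNat_inj.mp (by rw [hv]; decide))
    rcases List.mem_cons.mp hx with rfl | hxt
    · exact hc
    · have hdt : pvDigitsVal t = 0 := by rw [hsh, hc0] at h0; simpa using h0
      exact ih ht hdt x hxt

theorem pvLoop_nonneg (cs : List Char) :
    ∀ (fuel k : Nat) (res : Int), cs.length - k ≤ fuel →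
      pvLoopA cs (k : Int) res fuel = pvScan (cs.drop k) res := by
  intro fuel
  induction fuel with
  | zero =>
    intro k res h
    have hk : cs.length ≤ k := by omega
    rw [List.drop_of_length_le hk]
    rfl
  | succ n ih =>
    intro k res h
    by_cases hk : (k : Int) < PySem.Chars.len cs
    · have hkl : k < cs.length := by
        have := hk; rw [PySem.Chars.len_eq] at this; exact_mod_cast this
      rw [pvLoopA, if_pos hk]
      dsimp only
      have hget : PySem.List.pyGetD cs (k : Int) ' ' = cs[k] := by
        simp [PySem.List.pyGetD_natCast, List.getD_eq_getElem?_getD, hkl]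
      rw [List.drop_eq_getElem_cons hkl, pvScan, hget]
      split
      · have : ((k : Int) + 1) = ((k + 1 : Nat) : Int) := by push_cast; ring
        rw [this, ih (k + 1) _ (by omega)]
      · rfl
    · have hkl : cs.length ≤ k := by
        rw [PySem.Chars.len_eq] at hk; omega
      rw [pvLoopA, if_neg hk, List.drop_of_length_le hkl]
      rfl
theorem pvLoop_neg (cs : List Char) :
    ∀ (j : Nat) (res : Int), 0 < j → j ≤ cs.length →
      pvLoopA cs (-(j : Int)) res (cs.length + j) =
        pvScan (cs.drop (cs.length - j) ++ cs) res := by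
  intro j
  induction j with
  | zero => intro res h; omega
  | succ j ih =>
    intro res _ hle
    have hlt : -(((j:Nat) + 1 : Nat) : Int) < PySem.Chars.len cs := by
      rw [PySem.Chars.len_eq]; push_cast; omega
    have hget : PySem.List.pyGetD cs (-(((j:Nat) + 1 : Nat) : Int)) ' '
        = cs[cs.length - (j + 1)] := by
      exact_mod_cast PySem.List.pyGetD_neg_natCast cs (j + 1) ' ' (by omega) hle
    have hdrop : cs.drop (cs.length - (j + 1))
        = cs[cs.length - (j + 1)] :: cs.drop (cs.length - j) := by
      have e : cs.length - (j + 1) + 1 = cs.length - j := by omega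
      rw [List.drop_eq_getElem_cons (by omega), e]
    have hfuel : cs.length + (j + 1) = (cs.length + j) + 1 := by omega
    rw [hfuel, pvLoopA, if_pos hlt]
    dsimp only
    rw [hget, hdrop, List.cons_append, pvScan]
    split
    · by_cases hj : j = 0
      · subst hj
        have h1 : -((0 + 1 : Nat) : Int) + 1 = ((0 : Nat) : Int) := by norm_num
        rw [h1]
        have hnn := pvLoop_nonneg cs (cs.length + 0) 0 (res * 10 + ((cs[cs.length - (0 + 1)]).toNat - 48)) (by omega)
        have e2 : List.drop (cs.length - 0) cs ++ cs = cs := by simp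
        rw [e2]
        simp only [List.drop_zero] at hnn
        exact hnn
      · have h1 : -(((j:Nat) + 1 : Nat) : Int) + 1 = -((j : Nat) : Int) := by push_cast; ring
        rw [h1]
        exact ih _ (by omega) (by omega)
    · rfl

-- condition of B's validate branch, shared by the final proofs
theorem pvCond_true (cs : List Char) (m : Nat) (hm : m < cs.length)
    (hstr : ∀ c ∈ cs, pvDomChar c = true)
    (hdig : ∀ c ∈ cs.drop m, PySem.Chars.isdigit c = true) :
    ((cs.drop m).all (fun c => decide (c.toNat ≤ 127)) && PySem.Chars.strIsdigit (cs.drop m)) = true := by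
  apply Bool.and_eq_true_iff.mpr
  constructor
  · rw [List.all_eq_true]
    intro c hc
    have := hstr c (List.drop_subset m cs hc)
    simp only [pvDomChar, Bool.or_eq_true, Bool.and_eq_true, decide_eq_true_eq, beq_iff_eq] at this
    simp only [decide_eq_true_eq]
    omega
  · unfold PySem.Chars.strIsdigit
    apply Bool.and_eq_true_iff.mpr
    constructor
    · simp only [Bool.not_eq_true', List.isEmpty_eq_false_iff, ne_eq, List.drop_eq_nil_iff]
      omega
    · rw [List.all_eq_true]
      exact hdig

theorem pvCond_false (cs : List Char) (m : Nat) (c : Char) (hc : c ∈ cs.drop m)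
    (hcd : ¬ PySem.Chars.isdigit c = true) :
    ¬ (((cs.drop m).all (fun x => decide (x.toNat ≤ 127)) && PySem.Chars.strIsdigit (cs.drop m)) = true) := by
  intro h
  have h2 := (Bool.and_eq_true_iff.mp h).2
  unfold PySem.Chars.strIsdigit at h2
  have := (Bool.and_eq_true_iff.mp h2).2
  exact hcd (List.all_eq_true.mp this c hc)

-- A agrees with B whenever both run the nonnegative-start scan, and in the agreeing negative cases
theorem myint_core (s : String) (start : Int)
    (hstr : ∀ c ∈ s.toList, pvDomChar c = true)
    (hPre : -(PySem.Chars.len s.toList) ≤ start)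
    (hnD : ¬ D_myint_internal s start) :
    myint_internal s start = myint_internal_alt s start := by
  have hlen := PySem.Chars.len_eq s.toList
  unfold myint_internal myint_internal_alt
  by_cases hge : PySem.Chars.len s.toList ≤ start
  · rw [if_pos hge, if_pos hge]
  · rw [if_neg hge, if_neg hge]
    dsimp only
    rw [hlen] at hge hPre
    push Not at hge
    rcases le_or_gt 0 start with hpos | hneg
    · -- 0 ≤ start < len: both parse the suffix
      obtain ⟨k, rfl⟩ : ∃ k : Nat, start = (k : Int) := ⟨start.toNat, (Int.toNat_of_nonneg hpos).symm⟩
      have hk : k < s.toList.length := by exact_mod_cast hge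
      have hfuel : ((PySem.Chars.len s.toList) - (k : Int)).toNat = s.toList.length - k := by
        rw [hlen]; omega
      rw [hfuel, pvLoop_nonneg s.toList (s.toList.length - k) k 0 (by omega),
        PySem.List.slice_from_natCast]
      by_cases hdig : ∀ c ∈ s.toList.drop k, PySem.Chars.isdigit c = true
      · rw [if_pos (pvCond_true s.toList k hk hstr hdig)]
        simpa [pvDigitsVal] using pvScan_all (s.toList.drop k) 0 hdig
      · push Not at hdig
        obtain ⟨c, hc, hcd⟩ := hdig
        rw [if_neg (pvCond_false s.toList k c hc hcd)]
        exact pvScan_bad (s.toList.drop k) 0 ⟨c, hc, hcd⟩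
    · -- negative start inside Pre_: ¬D_ says the suffix has a non-digit or s is all '0'
      obtain ⟨j, rfl⟩ : ∃ j : Nat, start = -(j : Int) := by
        refine ⟨(-start).toNat, ?_⟩
        omega
      have hj0 : 0 < j := by omega
      have hjle : j ≤ s.toList.length := by omega
      have hfuel : ((PySem.Chars.len s.toList) - (-(j : Int))).toNat = s.toList.length + j := by
        rw [hlen]; omega
      have hsub : PySem.List.slice s.toList (some (-(j : Int))) none
          = s.toList.drop (s.toList.length - j) := by
        rw [PySem.List.slice_some_none, PySem.List.clampIdx_neg_natCast _ _ hj0]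
      rw [hfuel, pvLoop_neg s.toList j 0 hj0 hjle, hsub]
      unfold D_myint_internal at hnD
      push Not at hnD
      have htonat : (((s.toList.length : Int)) + -(j : Int)).toNat = s.toList.length - j := by omega
      by_cases hdig : ∀ c ∈ s.toList.drop (s.toList.length - j), PySem.Chars.isdigit c = true
      · -- suffix all digits: ¬D_ forces s to be all '0'; both sides are 0
        have hz : ∀ c ∈ s.toList, c = '0' := by
          have := hnD (by omega) (by rw [hlen]; omega)
            (by rw [htonat, List.all_eq_true]; exact hdig)
          exact fun c hc => of_decide_eq_true (List.all_eq_true.mp this c hc)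
        have hm : s.toList.length - j < s.toList.length := by omega
        rw [if_pos (pvCond_true s.toList _ hm hstr hdig)]
        have hzapp : ∀ c ∈ s.toList.drop (s.toList.length - j) ++ s.toList, c = '0' := by
          intro c hc
          rcases List.mem_append.mp hc with h | h
          · exact hz c (List.drop_subset _ _ h)
          · exact hz c h
        have hdapp : ∀ c ∈ s.toList.drop (s.toList.length - j) ++ s.toList,
            PySem.Chars.isdigit c = true := by
          intro c hc; rw [hzapp c hc]; decide
        rw [pvScan_all _ 0 hdapp, pvFold_zeros _ hzapp]
        exact (pvFold_zeros _ (fun c hc => hz c (List.drop_subset _ _ hc))).symm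
      · push Not at hdig
        obtain ⟨c, hc, hcd⟩ := hdig
        rw [if_neg (pvCond_false s.toList _ c hc hcd)]
        exact pvScan_bad _ 0 ⟨c, List.mem_append.mpr (Or.inl hc), hcd⟩

-- ===== VERDICT (by name: the statement is the Claim_ definition above) =====
theorem myint_internal_spec : Claim_unchanged_myint_internal := by
  intro s start hDom hPre hnD
  have hstr : ∀ c ∈ s.toList, pvDomChar c = true := by
    have h1 : pvDomStr s = true := by
      unfold Dom_myint_internal at hDom
      exact (Bool.and_eq_true_iff.mp hDom).1
    simpa [pvDomStr, List.all_eq_true] using h1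
  exact myint_core s start hstr hPre hnD

theorem myint_internal_changed : Claim_changed_myint_internal := by
  unfold Claim_changed_myint_internal; decide

theorem myint_internal_tight : Claim_exact_myint_internal := by
  intro s start hDom hPre hD
  have hstr : ∀ c ∈ s.toList, pvDomChar c = true := by
    have h1 : pvDomStr s = true := by
      unfold Dom_myint_internal at hDom
      exact (Bool.and_eq_true_iff.mp hDom).1
    simpa [pvDomStr, List.all_eq_true] using h1
  unfold D_myint_internal at hD
  obtain ⟨hneg, hpre, hdig, hnz⟩ := hD
  have hlen := PySem.Chars.len_eq s.toList
  obtain ⟨j, rfl⟩ : ∃ j : Nat, start = -(j : Int) := by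
    refine ⟨(-start).toNat, ?_⟩
    omega
  rw [hlen] at hpre
  have hj0 : 0 < j := by omega
  have hjle : j ≤ s.toList.length := by omega
  have htonat : (((s.toList.length : Int)) + -(j : Int)).toNat = s.toList.length - j := by omega
  rw [htonat] at hdig
  have hdig' : ∀ c ∈ s.toList.drop (s.toList.length - j), PySem.Chars.isdigit c = true :=
    List.all_eq_true.mp hdig
  have hge : ¬ PySem.Chars.len s.toList ≤ -(j : Int) := by rw [hlen]; omega
  have hm : s.toList.length - j < s.toList.length := by omega
  have hsub : PySem.List.slice s.toList (some (-(j : Int))) none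
      = s.toList.drop (s.toList.length - j) := by
    rw [PySem.List.slice_some_none, PySem.List.clampIdx_neg_natCast _ _ hj0]
  have hfuel : ((PySem.Chars.len s.toList) - (-(j : Int))).toNat = s.toList.length + j := by
    rw [hlen]; omega
  have hB : myint_internal_alt s (-(j : Int))
      = pvDigitsVal (s.toList.drop (s.toList.length - j)) := by
    unfold myint_internal_alt
    rw [if_neg hge]
    dsimp only
    rw [hsub, if_pos (pvCond_true s.toList _ hm hstr hdig')]
  have hA : myint_internal s (-(j : Int))
      = pvScan (s.toList.drop (s.toList.length - j) ++ s.toList) 0 := by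
    unfold myint_internal
    rw [if_neg hge, hfuel, pvLoop_neg s.toList j 0 hj0 hjle]
  rw [hA, hB]
  have hvnn : 0 ≤ pvDigitsVal (s.toList.drop (s.toList.length - j)) :=
    pvFold_nonneg _ 0 hdig' le_rfl
  by_cases hall : ∀ c ∈ s.toList, PySem.Chars.isdigit c = true
  · -- everything is a digit: A = v * 10^len + N, B = v; equality would force s all '0'
    have hdapp : ∀ c ∈ s.toList.drop (s.toList.length - j) ++ s.toList,
        PySem.Chars.isdigit c = true := by
      intro c hc
      rcases List.mem_append.mp hc with h | h
      · exact hdig' c h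
      · exact hall c h
    rw [pvScan_all _ 0 hdapp, List.foldl_append]
    have hsh := pvFold_shift s.toList (List.foldl (fun acc c => acc * 10 + ((c.toNat : Int) - 48)) 0 (s.toList.drop (s.toList.length - j)))
    rw [hsh]
    have hfv : List.foldl (fun acc c => acc * 10 + ((c.toNat : Int) - 48)) 0
        (s.toList.drop (s.toList.length - j))
        = pvDigitsVal (s.toList.drop (s.toList.length - j)) := rfl
    rw [hfv]
    intro hEq
    have hNnn : 0 ≤ pvDigitsVal s.toList := pvFold_nonneg _ 0 hall le_rfl
    have hpow : (10 : Int) ^ 1 ≤ 10 ^ s.toList.length := by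
      apply pow_le_pow_right₀ (by norm_num)
      omega
    have hv : pvDigitsVal (s.toList.drop (s.toList.length - j)) = 0 ∧ pvDigitsVal s.toList = 0 := by
      constructor <;> nlinarith [hEq, hvnn, hNnn, hpow]
    have hz := pvZeros_of_fold s.toList hall hv.2
    exact hnz (List.all_eq_true.mpr (fun c hc => decide_eq_true (hz c hc)))
  · push Not at hall
    obtain ⟨c, hc, hcd⟩ := hall
    rw [pvScan_bad _ 0 ⟨c, List.mem_append.mpr (Or.inr hc), hcd⟩]
    omega
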